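-- pv_equiv track=rewrite | github.com/AsiriweLab/S5-HES-Agent | backend/src/iot/protocols/http_handler.py | _webhook_event_matches
-- ===== SOURCE A (Python) =====
-- def _webhook_event_matches(event_type: str, subscribed_events: list[str]) -> bool:
--     """Check if an event type matches any subscribed patterns."""
--     for pattern in subscribed_events:
--         if pattern == "*":
--             return True
--         if pattern == event_type:
--             return True
--         # Support wildcards like "device.*"
--         if pattern.endswith(".*"):
--             prefix = pattern[:-2]
--             if event_type.startswith(prefix + "."):
--                 return True
--     return False
-- ===== SOURCE B (Python) =====
-- def _webhook_event_matches(event_type: str, subscribed_events: list[str]) -> bool: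
--     """Check if an event type matches any subscribed patterns."""
--     candidates = {"*", event_type}
--     candidates.update(event_type[:i] + ".*" for i, ch in enumerate(event_type) if ch == ".")
--     return not candidates.isdisjoint(subscribed_events)
-- ===== Notes on version B (the rewrite author's own statement) =====
-- stated objective: alternative
-- what changed: Instead of scanning each subscribed pattern and testing wildcard logic on it, B enumerates from event_type alone the finite candidate set {'*', event_type} plus the dot-boundary prefixes event_type[:i]+'.*', and answers by set intersection with the subscription list.
import Mathlib
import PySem

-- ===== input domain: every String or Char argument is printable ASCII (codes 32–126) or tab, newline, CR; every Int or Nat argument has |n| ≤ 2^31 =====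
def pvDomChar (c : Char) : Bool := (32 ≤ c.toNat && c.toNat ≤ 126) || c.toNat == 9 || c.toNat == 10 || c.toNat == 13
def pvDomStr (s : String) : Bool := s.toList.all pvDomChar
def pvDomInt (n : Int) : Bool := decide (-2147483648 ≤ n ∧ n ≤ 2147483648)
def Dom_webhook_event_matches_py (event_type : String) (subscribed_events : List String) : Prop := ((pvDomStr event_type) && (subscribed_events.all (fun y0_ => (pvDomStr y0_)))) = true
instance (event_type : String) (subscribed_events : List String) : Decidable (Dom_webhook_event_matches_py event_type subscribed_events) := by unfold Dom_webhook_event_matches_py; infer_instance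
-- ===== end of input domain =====

-- B replaces A's per-pattern wildcard scan by enumerating, from event_type alone, the finite
-- set of patterns that can match it and testing membership against the subscription list.
-- ===== PORT A =====
-- string concatenation/slicing done on the PySem.Chars (List Char) side, exact per PYSEM.md
def webhook_event_matches_py (event_type : String) (subscribed_events : List String) : Bool :=
  match subscribed_events with
  | [] => false
  | pattern :: rest =>
    if pattern == "*" then true
    else if pattern == event_type then true
    else if PySem.Str.endswith pattern ".*" &&
            PySem.Chars.startswith event_type.toList
              (PySem.Chars.slice pattern.toList none (some (-2)) ++ ['.']) then true
    else webhook_event_matches_py event_type rest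

-- ===== PORT B =====
-- the candidate set {"*", event_type} ∪ {event_type[:i] + ".*" | event_type[i] = '.'}
def pvCandidates (event_type : String) : List String :=
  "*" :: event_type ::
    (List.range event_type.toList.length).filterMap (fun i =>
      if event_type.toList[i]? == some '.' then
        some (String.ofList (event_type.toList.take i ++ ['.', '*']))
      else none)

def webhook_event_matches_py_alt (event_type : String) (subscribed_events : List String) : Bool :=
  subscribed_events.any (fun p => (pvCandidates event_type).contains p)

-- ===== PRECONDITION & SPEC =====
def Spec_webhook_event_matches_py (event_type : String) (subscribed_events : List String) (out : Bool) : Prop := out = webhook_event_matches_py_alt event_type subscribed_events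
instance (event_type : String) (subscribed_events : List String) (out : Bool) : Decidable (Spec_webhook_event_matches_py event_type subscribed_events out) := by unfold Spec_webhook_event_matches_py; infer_instance

-- ===== CLAIM (what is proved, stated in full; the proofs are below) =====
def Claim_equal_webhook_event_matches_py : Prop := ∀ (event_type : String) (subscribed_events : List String), Dom_webhook_event_matches_py event_type subscribed_events → Spec_webhook_event_matches_py event_type subscribed_events (webhook_event_matches_py event_type subscribed_events)

-- ===== LEMMAS AND PROOFS =====
-- A's per-pattern test, abstracted so A's loop reads as a fold over it
def pvMatchOne (event_type pattern : String) : Bool :=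
  (pattern == "*") || (pattern == event_type) ||
    (PySem.Str.endswith pattern ".*" &&
     PySem.Chars.startswith event_type.toList
       (PySem.Chars.slice pattern.toList none (some (-2)) ++ ['.']))

lemma pvA_cons (event_type p : String) (rest : List String) :
    webhook_event_matches_py event_type (p :: rest) =
      (pvMatchOne event_type p || webhook_event_matches_py event_type rest) := by
  simp [webhook_event_matches_py, pvMatchOne, beq_eq_decide, Bool.or_assoc]

-- the wildcard branch, characterised on the char-list side
lemma pvWild_iff (tl pl : List Char) :
    (['.', '*'] <:+ pl ∧ (pl.take (pl.length - 2) ++ ['.']) <+: tl) ↔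
    ∃ i, i < tl.length ∧ tl[i]? = some '.' ∧ pl = tl.take i ++ ['.', '*'] := by
  constructor
  · rintro ⟨⟨q, rfl⟩, hpre⟩
    have hq : (q ++ ['.', '*']).take ((q ++ ['.', '*']).length - 2) = q := by
      have h1 : (q ++ ['.', '*']).length - 2 = q.length := by simp
      rw [h1, List.take_append_of_le_length (le_refl _), List.take_length]
    rw [hq] at hpre
    obtain ⟨r, hr⟩ := hpre
    refine ⟨q.length, ?_, ?_, ?_⟩
    · rw [← hr]; simp
    · rw [← hr, List.append_assoc, List.getElem?_append_right (le_refl _)]; simp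
    · rw [← hr, List.append_assoc, List.take_append_of_le_length (le_refl _), List.take_length]
  · rintro ⟨i, hi, hget, rfl⟩
    have hlen : (tl.take i).length = i := by simp; omega
    refine ⟨⟨tl.take i, rfl⟩, ?_⟩
    have h2 : (tl.take i ++ ['.', '*']).length - 2 = i := by simp [hlen]
    rw [h2, List.take_append_of_le_length (by omega), List.take_take, min_self]
    refine ⟨tl.drop (i + 1), ?_⟩
    have ht : tl.take i ++ ['.'] = tl.take (i + 1) := by
      rw [List.take_add_one, hget]; rfl
    rw [ht, List.take_append_drop]

lemma pvDotStar_toList : (".*" : String).toList = ['.', '*'] := rfl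

-- membership in B's candidate list, spelt out
lemma pvCand_mem_iff (t p : String) :
    p ∈ pvCandidates t ↔
      p = "*" ∨ p = t ∨ ∃ i, i < t.toList.length ∧ t.toList[i]? = some '.' ∧
        p.toList = t.toList.take i ++ ['.', '*'] := by
  simp only [pvCandidates, List.mem_cons, List.mem_filterMap, List.mem_range]
  refine or_congr Iff.rfl (or_congr Iff.rfl ?_)
  constructor
  · rintro ⟨i, hi, hif⟩
    by_cases hd : (t.toList[i]? == some '.') = true
    · rw [if_pos hd] at hif
      refine ⟨i, hi, by simpa using hd, ?_⟩
      rw [← Option.some.inj hif, String.toList_ofList]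
    · rw [if_neg hd] at hif; exact absurd hif (by simp)
  · rintro ⟨i, hi, hget, hpl⟩
    refine ⟨i, hi, ?_⟩
    rw [if_pos (by simpa using hget)]
    have : p = String.ofList (t.toList.take i ++ ['.', '*']) := by
      rw [← hpl, String.ofList_toList]
    rw [this]

-- A's wildcard branch accepts p exactly at the dot-boundary prefixes of t
lemma pvWild_eq (t p : String) :
    (PySem.Str.endswith p ".*" &&
     PySem.Chars.startswith t.toList
       (PySem.Chars.slice p.toList none (some (-2)) ++ ['.'])) = true ↔
      ∃ i, i < t.toList.length ∧ t.toList[i]? = some '.' ∧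
        p.toList = t.toList.take i ++ ['.', '*'] := by
  have hs : PySem.Chars.slice p.toList none (some (-2)) =
      p.toList.take (p.toList.length - 2) := by
    simp [PySem.Chars.slice, pysem]
  rw [hs, PySem.Str.endswith_eq, pvDotStar_toList]
  simp only [PySem.Chars.endswith, PySem.Chars.startswith, Bool.and_eq_true,
    List.isSuffixOf_iff_suffix, List.isPrefixOf_iff_prefix]
  exact pvWild_iff t.toList p.toList

-- A's test accepts pattern p exactly when p is one of B's candidates
lemma pvMatchOne_eq_contains (event_type p : String) :
    pvMatchOne event_type p = (pvCandidates event_type).contains p := by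
  rw [Bool.eq_iff_iff]
  have hco : (pvCandidates event_type).contains p = true ↔ p ∈ pvCandidates event_type := by
    simp
  rw [hco, pvCand_mem_iff]
  simp only [pvMatchOne, Bool.or_eq_true, beq_iff_eq]
  rw [pvWild_eq]
  tauto

lemma pvMain (event_type : String) (subs : List String) :
    webhook_event_matches_py event_type subs = webhook_event_matches_py_alt event_type subs := by
  induction subs with
  | nil => simp [webhook_event_matches_py, webhook_event_matches_py_alt]
  | cons p rest ih =>
    rw [pvA_cons, ih, pvMatchOne_eq_contains]
    simp [webhook_event_matches_py_alt]

-- ===== VERDICT (by name: the statement is the Claim_ definition above) =====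
theorem webhook_event_matches_py_spec : Claim_equal_webhook_event_matches_py := by
  intro event_type subscribed_events _
  unfold Spec_webhook_event_matches_py
  exact pvMain event_type subscribed_events
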